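-- pv_equiv track=rewrite | github.com/pypi-data/pypi-mirror-389 | packages/swingft-test-v3/swingft_test_v3-1.4.0-py3-none-any.whl/swingft_cli/Obfuscation_Pipeline/Opaquepredicate/run_opaque.py | has_top_level_binding
-- ===== SOURCE A (Python) =====
-- def is_ident_char(c: str) -> bool:
--     return c.isalnum() or c == '_'
--
-- def has_top_level_binding(head: str) -> bool:
--     depth = 0; i = 0; n = len(head)
--     in_sl = in_ml = in_str = False; esc = False
--     while i < n:
--         ch = head[i]
--         if in_sl:
--             if ch == '\n': in_sl = False
--         elif in_ml:
--             if ch == '*' and i+1<n and head[i+1]=='/': in_ml=False; i += 1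
--         elif in_str:
--             if esc: esc=False
--             elif ch=='\\': esc=True
--             elif ch=='"': in_str=False
--         else:
--             if ch=='/' and i+1<n and head[i+1]=='/': in_sl=True; i+=1
--             elif ch=='/' and i+1<n and head[i+1]=='*': in_ml=True; i+=1
--             elif ch=='"': in_str=True
--             elif ch=='(':
--                 depth += 1
--             elif ch==')':
--                 depth = max(0, depth-1)
--             elif depth == 0:
--                 for kw in ("let", "var", "case"):
--                     k = len(kw)
--                     if head.startswith(kw, i) and (i==0 or not is_ident_char(head[i-1])) and (i+k==n or not is_ident_char(head[i+k])):
--                         return True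
--         i += 1
--     return False
-- ===== SOURCE B (Python) =====
-- def is_ident_char(c: str) -> bool:
--     return c.isalnum() or c == '_'
--
-- def _mask(head: str) -> str:
--     # replace every character lying in a //, /* */ comment or "…" string
--     # (delimiters included) by a space; keep code characters as-is
--     out = []
--     i = 0; n = len(head)
--     in_sl = in_ml = in_str = False; esc = False
--     while i < n:
--         ch = head[i]
--         if in_sl:
--             out.append(' ')
--             if ch == '\n': in_sl = False
--         elif in_ml:
--             if ch == '*' and i+1 < n and head[i+1] == '/':
--                 out.append(' '); out.append(' '); in_ml = False; i += 1
--             else: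
--                 out.append(' ')
--         elif in_str:
--             out.append(' ')
--             if esc: esc = False
--             elif ch == '\\': esc = True
--             elif ch == '"': in_str = False
--         else:
--             if ch == '/' and i+1 < n and head[i+1] == '/':
--                 out.append(' '); out.append(' '); in_sl = True; i += 1
--             elif ch == '/' and i+1 < n and head[i+1] == '*':
--                 out.append(' '); out.append(' '); in_ml = True; i += 1
--             elif ch == '"':
--                 out.append(' '); in_str = True
--             else:
--                 out.append(ch)
--         i += 1
--     return ''.join(out)
--
-- def has_top_level_binding(head: str) -> bool:
--     masked = _mask(head)
--     depth = 0
--     n = len(masked)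
--     for i, ch in enumerate(masked):
--         if ch == '(':
--             depth += 1
--         elif ch == ')':
--             depth = max(0, depth - 1)
--         elif depth == 0:
--             for kw in ("let", "var", "case"):
--                 k = len(kw)
--                 if masked.startswith(kw, i) and (i == 0 or not is_ident_char(masked[i-1])) and (i+k == n or not is_ident_char(masked[i+k])):
--                     return True
--     return False
-- ===== Notes on version B (the rewrite author's own statement) =====
-- stated objective: alternative
-- what changed: B splits A's single stateful scan into two passes: first it masks every comment/string character (delimiters included) to a space with the same state machine, then a plain paren-depth/keyword scan runs over the masked text with no comment or string state at all.
import Mathlib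
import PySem

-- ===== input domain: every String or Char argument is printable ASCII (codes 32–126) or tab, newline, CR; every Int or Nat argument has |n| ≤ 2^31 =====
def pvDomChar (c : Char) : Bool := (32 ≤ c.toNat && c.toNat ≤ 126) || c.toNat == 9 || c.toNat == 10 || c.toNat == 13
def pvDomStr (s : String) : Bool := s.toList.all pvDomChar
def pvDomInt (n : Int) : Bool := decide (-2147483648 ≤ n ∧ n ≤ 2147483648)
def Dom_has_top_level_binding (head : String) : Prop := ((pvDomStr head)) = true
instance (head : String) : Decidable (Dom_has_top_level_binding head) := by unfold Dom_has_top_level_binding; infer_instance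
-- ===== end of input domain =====

-- B re-implements A as two passes (mask comments/strings to spaces, then a plain
-- depth/keyword scan over the masked text); objective: alternative decomposition, not speed.

-- shared helper: Python's is_ident_char (isalnum is exact on the ASCII domain)
def isIdentC (c : Char) : Bool := c.isAlphanum || c == '_'

-- badPrev p = "p is an identifier character" (none = string boundary)
def badPrev : Option Char → Bool
  | none => false
  | some c => isIdentC c

-- head.startswith(kw, i) together with the following-boundary check, viewed from position i
def kwHit (ks cs : List Char) : Bool :=
  ks.isPrefixOf cs && !badPrev ((cs.drop ks.length).head?)

-- the inner `for kw in ("let","var","case")` check at one position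
def kwMatch (cs : List Char) (prev : Option Char) : Bool :=
  !badPrev prev &&
    (kwHit ['l','e','t'] cs || kwHit ['v','a','r'] cs || kwHit ['c','a','s','e'] cs)

inductive ScanSt
  | code | sl | ml | str (esc : Bool)
deriving DecidableEq

-- ===== PORT A =====
-- depth is a Nat: Python keeps it ≥ 0 via max(0, depth-1), which is Nat subtraction
def loopA : List Char → Option Char → Nat → ScanSt → Bool
  | [], _, _, _ => false
  | c :: rest, _, depth, .sl =>
      loopA rest (some c) depth (if c = '\n' then .code else .sl)
  | c :: rest, _, depth, .ml =>
      if c = '*' ∧ rest.head? = some '/' then loopA rest.tail (some '/') depth .code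
      else loopA rest (some c) depth .ml
  | c :: rest, _, depth, .str esc =>
      if esc then loopA rest (some c) depth (.str false)
      else if c = '\\' then loopA rest (some c) depth (.str true)
      else if c = '"' then loopA rest (some c) depth .code
      else loopA rest (some c) depth (.str false)
  | c :: rest, prev, depth, .code =>
      if c = '/' ∧ rest.head? = some '/' then loopA rest.tail (some '/') depth .sl
      else if c = '/' ∧ rest.head? = some '*' then loopA rest.tail (some '*') depth .ml
      else if c = '"' then loopA rest (some '"') depth (.str false)
      else if c = '(' then loopA rest (some c) (depth + 1) .code
      else if c = ')' then loopA rest (some c) (depth - 1) .code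
      else if depth = 0 ∧ kwMatch (c :: rest) prev then true
      else loopA rest (some c) depth .code
  termination_by cs _ _ _ => cs.length
  decreasing_by all_goals simp [List.length_tail]; try omega

def has_top_level_binding (head : String) : Bool := loopA head.toList none 0 .code

-- ===== PORT B =====
-- pass 1: same comment/string state machine, but it only writes spaces over masked regions
def maskB : List Char → ScanSt → List Char
  | [], _ => []
  | c :: rest, .sl => ' ' :: maskB rest (if c = '\n' then .code else .sl)
  | c :: rest, .ml =>
      if c = '*' ∧ rest.head? = some '/' then ' ' :: ' ' :: maskB rest.tail .code
      else ' ' :: maskB rest .ml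
  | c :: rest, .str esc =>
      if esc then ' ' :: maskB rest (.str false)
      else if c = '\\' then ' ' :: maskB rest (.str true)
      else if c = '"' then ' ' :: maskB rest .code
      else ' ' :: maskB rest (.str false)
  | c :: rest, .code =>
      if c = '/' ∧ rest.head? = some '/' then ' ' :: ' ' :: maskB rest.tail .sl
      else if c = '/' ∧ rest.head? = some '*' then ' ' :: ' ' :: maskB rest.tail .ml
      else if c = '"' then ' ' :: maskB rest (.str false)
      else c :: maskB rest .code
  termination_by cs _ => cs.length
  decreasing_by all_goals simp [List.length_tail]; try omega

-- pass 2: plain paren-depth / keyword scan over the masked text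
def scanB : List Char → Option Char → Nat → Bool
  | [], _, _ => false
  | c :: rest, prev, depth =>
      if c = '(' then scanB rest (some c) (depth + 1)
      else if c = ')' then scanB rest (some c) (depth - 1)
      else if depth = 0 ∧ kwMatch (c :: rest) prev then true
      else scanB rest (some c) depth

def has_top_level_binding_alt (head : String) : Bool :=
  scanB (maskB head.toList .code) none 0

-- ===== PRECONDITION & SPEC =====
def Spec_has_top_level_binding (head : String) (out : Bool) : Prop := out = has_top_level_binding_alt head
instance (head : String) (out : Bool) : Decidable (Spec_has_top_level_binding head out) := by unfold Spec_has_top_level_binding; infer_instance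

-- ===== CLAIM (what is proved, stated in full; the proofs are below) =====
def Claim_equal_has_top_level_binding : Prop := ∀ (head : String), Dom_has_top_level_binding head → Spec_has_top_level_binding head (has_top_level_binding head)

-- ===== LEMMAS AND PROOFS =====

-- a masked space is consumed by scanB with no effect except prev := ' '
theorem scanB_space (ms : List Char) (prev : Option Char) (depth : Nat) :
    scanB (' ' :: ms) prev depth = scanB ms (some ' ') depth := by
  simp [scanB, kwMatch, kwHit, List.isPrefixOf]

-- an identifier character is none of the characters masking can put first
theorem ident_ne (k c' : Char) (hk : isIdentC k = true) (hc : isIdentC c' = false) :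
    (k == c') = false := by
  refine beq_eq_false_iff_ne.mpr (fun h => ?_)
  rw [h, hc] at hk; exact Bool.false_ne_true hk

-- masking in code state leaves the "keyword hit at this position" test unchanged
theorem kwHit_mask (ks : List Char) (hks : ks.all isIdentC = true) :
    ∀ l : List Char, kwHit ks l = kwHit ks (maskB l .code) := by
  induction ks with
  | nil =>
      intro l
      match l with
      | [] => simp [maskB]
      | c :: rest =>
          simp only [kwHit, List.isPrefixOf, List.drop, List.length_nil, Bool.true_and]
          by_cases h1 : c = '/' ∧ rest.head? = some '/'
          · simp [maskB, h1, badPrev, isIdentC, h1.1]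
          · by_cases h2 : c = '/' ∧ rest.head? = some '*'
            · simp [maskB, h1, h2, badPrev, isIdentC, h2.1]
            · by_cases h3 : c = '"'
              · simp [maskB, h1, h2, h3, badPrev, isIdentC]
              · simp [maskB, h1, h2, h3]
  | cons k ks' ih =>
      intro l
      simp only [List.all_cons, Bool.and_eq_true] at hks
      have hk : isIdentC k = true := hks.1
      have ih' := ih hks.2
      have hsl : (k == ' ') = false := ident_ne k ' ' hk (by decide)
      have hqu : (k == '"') = false := ident_ne k '"' hk (by decide)
      have hdv : (k == '/') = false := ident_ne k '/' hk (by decide)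
      match l with
      | [] => simp [maskB]
      | c :: rest =>
          by_cases h1 : c = '/' ∧ rest.head? = some '/'
          · simp [kwHit, maskB, h1, List.isPrefixOf, hsl, hdv, h1.1]
          · by_cases h2 : c = '/' ∧ rest.head? = some '*'
            · simp [kwHit, maskB, h1, h2, List.isPrefixOf, hsl, hdv, h2.1]
            · by_cases h3 : c = '"'
              · simp [kwHit, maskB, h1, h2, h3, List.isPrefixOf, hsl, hqu]
              · rw [show maskB (c :: rest) .code = c :: maskB rest .code by
                  simp [maskB, h1, h2, h3]]
                by_cases hkc : k = c
                · subst hkc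
                  simp only [kwHit, List.isPrefixOf, beq_self_eq_true, Bool.true_and,
                    List.length_cons, List.drop_succ_cons]
                  simpa [kwHit] using ih' rest
                · have hf : (k == c) = false := beq_eq_false_iff_ne.mpr hkc
                  simp [kwHit, List.isPrefixOf, hf]

theorem kwMatch_mask (c : Char) (rest : List Char) (prevA prevB : Option Char)
    (hprev : badPrev prevA = badPrev prevB)
    (hmask : maskB (c :: rest) .code = c :: maskB rest .code) :
    kwMatch (c :: rest) prevA = kwMatch (c :: maskB rest .code) prevB := by
  unfold kwMatch
  rw [hprev, ← hmask,
    ← kwHit_mask ['l','e','t'] (by decide) (c :: rest),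
    ← kwHit_mask ['v','a','r'] (by decide) (c :: rest),
    ← kwHit_mask ['c','a','s','e'] (by decide) (c :: rest)]

-- main invariant: A's single pass equals B's scan over the masked text,
-- provided the two "previous characters" agree on identifier-ness in code state
theorem loopA_eq_scanB : ∀ (n : Nat) (cs : List Char), cs.length ≤ n →
    ∀ (prevA prevB : Option Char) (depth : Nat) (st : ScanSt),
    (st = .code → badPrev prevA = badPrev prevB) →
    loopA cs prevA depth st = scanB (maskB cs st) prevB depth := by
  intro n
  induction n with
  | zero =>
      intro cs hcs
      have : cs = [] := List.length_eq_zero_iff.mp (Nat.le_zero.mp hcs)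
      subst this; intro _ _ _ _ _; simp [loopA, maskB, scanB]
  | succ n ih =>
      intro cs hcs prevA prevB depth st hprev
      match cs with
      | [] => simp [loopA, maskB, scanB]
      | c :: rest =>
        have hr : rest.length ≤ n := by simp at hcs; omega
        have hrt : rest.tail.length ≤ n := by
          simp [List.length_tail]; omega
        match st with
        | .sl =>
            rw [show maskB (c :: rest) .sl
                = ' ' :: maskB rest (if c = '\n' then .code else .sl) by simp [maskB],
              scanB_space, show loopA (c :: rest) prevA depth .sl
                = loopA rest (some c) depth (if c = '\n' then .code else .sl) by simp [loopA]]
            apply ih rest hr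
            intro h
            by_cases hc : c = '\n'
            · subst hc; decide
            · simp [hc] at h
        | .ml =>
            by_cases h1 : c = '*' ∧ rest.head? = some '/'
            · rw [show loopA (c :: rest) prevA depth .ml
                  = loopA rest.tail (some '/') depth .code by simp [loopA, h1],
                show maskB (c :: rest) .ml = ' ' :: ' ' :: maskB rest.tail .code by
                  simp [maskB, h1], scanB_space, scanB_space]
              exact ih rest.tail hrt _ _ _ _ (fun _ => by decide)
            · rw [show loopA (c :: rest) prevA depth .ml
                  = loopA rest (some c) depth .ml by simp [loopA, h1],
                show maskB (c :: rest) .ml = ' ' :: maskB rest .ml by simp [maskB, h1],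
                scanB_space]
              exact ih rest hr _ _ _ _ (fun h => by simp at h)
        | .str esc =>
            by_cases he : esc = true
            · subst he
              rw [show loopA (c :: rest) prevA depth (.str true)
                  = loopA rest (some c) depth (.str false) by simp [loopA],
                show maskB (c :: rest) (.str true) = ' ' :: maskB rest (.str false) by
                  simp [maskB], scanB_space]
              exact ih rest hr _ _ _ _ (fun h => by simp at h)
            · have he' : esc = false := by simpa using he
              subst he'
              by_cases h1 : c = '\\'
              · rw [show loopA (c :: rest) prevA depth (.str false)
                    = loopA rest (some c) depth (.str true) by simp [loopA, h1],
                  show maskB (c :: rest) (.str false) = ' ' :: maskB rest (.str true) by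
                    simp [maskB, h1], scanB_space]
                exact ih rest hr _ _ _ _ (fun h => by simp at h)
              · by_cases h2 : c = '"'
                · rw [show loopA (c :: rest) prevA depth (.str false)
                      = loopA rest (some c) depth .code by simp [loopA, h1, h2],
                    show maskB (c :: rest) (.str false) = ' ' :: maskB rest .code by
                      simp [maskB, h1, h2], scanB_space]
                  subst h2
                  exact ih rest hr _ _ _ _ (fun _ => by decide)
                · rw [show loopA (c :: rest) prevA depth (.str false)
                      = loopA rest (some c) depth (.str false) by simp [loopA, h1, h2],
                    show maskB (c :: rest) (.str false) = ' ' :: maskB rest (.str false) by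
                      simp [maskB, h1, h2], scanB_space]
                  exact ih rest hr _ _ _ _ (fun h => by simp at h)
        | .code =>
            have hid : badPrev prevA = badPrev prevB := hprev rfl
            by_cases h1 : c = '/' ∧ rest.head? = some '/'
            · rw [show loopA (c :: rest) prevA depth .code
                  = loopA rest.tail (some '/') depth .sl by simp [loopA, h1],
                show maskB (c :: rest) .code = ' ' :: ' ' :: maskB rest.tail .sl by
                  simp [maskB, h1], scanB_space, scanB_space]
              exact ih rest.tail hrt _ _ _ _ (fun h => by simp at h)
            · by_cases h2 : c = '/' ∧ rest.head? = some '*'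
              · rw [show loopA (c :: rest) prevA depth .code
                    = loopA rest.tail (some '*') depth .ml by simp [loopA, h1, h2],
                  show maskB (c :: rest) .code = ' ' :: ' ' :: maskB rest.tail .ml by
                    simp [maskB, h1, h2], scanB_space, scanB_space]
                exact ih rest.tail hrt _ _ _ _ (fun h => by simp at h)
              · by_cases h3 : c = '"'
                · rw [show loopA (c :: rest) prevA depth .code
                      = loopA rest (some '"') depth (.str false) by simp [loopA, h1, h2, h3],
                    show maskB (c :: rest) .code = ' ' :: maskB rest (.str false) by
                      simp [maskB, h1, h2, h3], scanB_space]
                  exact ih rest hr _ _ _ _ (fun h => by simp at h)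
                · have hmask : maskB (c :: rest) .code = c :: maskB rest .code := by
                    simp [maskB, h1, h2, h3]
                  by_cases h4 : c = '('
                  · rw [show loopA (c :: rest) prevA depth .code
                        = loopA rest (some c) (depth + 1) .code by
                          simp [loopA, h1, h2, h3, h4],
                      hmask, show scanB (c :: maskB rest .code) prevB depth
                        = scanB (maskB rest .code) (some c) (depth + 1) by
                          simp [scanB, h4]]
                    exact ih rest hr _ _ _ _ (fun _ => rfl)
                  · by_cases h5 : c = ')'
                    · rw [show loopA (c :: rest) prevA depth .code
                          = loopA rest (some c) (depth - 1) .code by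
                            simp [loopA, h1, h2, h3, h4, h5],
                        hmask, show scanB (c :: maskB rest .code) prevB depth
                          = scanB (maskB rest .code) (some c) (depth - 1) by
                            simp [scanB, h4, h5]]
                      exact ih rest hr _ _ _ _ (fun _ => rfl)
                    · have hkw := kwMatch_mask c rest prevA prevB hid hmask
                      rw [show loopA (c :: rest) prevA depth .code
                          = if depth = 0 ∧ kwMatch (c :: rest) prevA = true then true
                            else loopA rest (some c) depth .code by
                            simp [loopA, h1, h2, h3, h4, h5],
                        hmask, show scanB (c :: maskB rest .code) prevB depth
                          = if depth = 0 ∧ kwMatch (c :: maskB rest .code) prevB = true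
                            then true else scanB (maskB rest .code) (some c) depth by
                            simp [scanB, h4, h5]]
                      rw [← hkw]
                      by_cases h6 : depth = 0 ∧ kwMatch (c :: rest) prevA = true
                      · simp [h6]
                      · simp only [h6, if_false]
                        exact ih rest hr _ _ _ _ (fun _ => rfl)

-- ===== VERDICT (by name: the statement is the Claim_ definition above) =====
theorem has_top_level_binding_spec : Claim_equal_has_top_level_binding := by
  intro head _
  unfold Spec_has_top_level_binding has_top_level_binding has_top_level_binding_alt
  exact loopA_eq_scanB head.toList.length head.toList le_rfl none none 0 .code (fun _ => rfl)
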